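-- pv_equiv track=rewrite | github.com/hotaru-ishibashi/python-library-atcoder | catalan.py | catalan_table
-- ===== SOURCE A (Python) =====
-- def catalan_table(N):
--     dp = [0] * (N+1)
--     dp[0] = 1
--
--     for n in range(1, N+1):
--         res = 0
--         for i in range(n):
--             res += dp[i]*dp[n-1-i]
--
--         dp[n] = res
--
--     return dp
-- ===== SOURCE B (Python) =====
-- def catalan_table(N):
--     dp = [1]
--     c = 1
--     for n in range(1, N + 1):
--         c = c * 2 * (2 * n - 1) // (n + 1)  # exact: (n+1) | c*2*(2n-1)
--         dp.append(c)
--     return dp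
-- ===== Notes on version B (the rewrite author's own statement) =====
-- stated objective: faster
-- what changed: Replaces the O(N^2) convolution dp[n] = sum(dp[i]*dp[n-1-i]) by the linear recurrence C(n) = C(n-1)*2*(2n-1)//(n+1) with exact integer division, one multiplication-division step per entry.
import Mathlib
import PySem

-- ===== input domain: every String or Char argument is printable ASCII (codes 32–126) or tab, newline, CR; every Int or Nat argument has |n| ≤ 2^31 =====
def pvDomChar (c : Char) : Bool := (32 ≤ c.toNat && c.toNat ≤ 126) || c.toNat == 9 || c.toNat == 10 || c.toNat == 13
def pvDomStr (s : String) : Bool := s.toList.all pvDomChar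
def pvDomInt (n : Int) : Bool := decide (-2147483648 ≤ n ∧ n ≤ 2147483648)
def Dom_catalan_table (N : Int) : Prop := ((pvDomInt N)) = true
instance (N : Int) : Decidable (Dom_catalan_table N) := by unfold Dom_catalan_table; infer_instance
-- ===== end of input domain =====

-- B replaces A's O(N^2) self-convolution table by the linear Catalan recurrence
-- C(n) = C(n-1)*2*(2n-1)//(n+1) (exact integer division), one step per entry.

-- ===== PORT A =====
def catalan_table (N : Int) : List Int :=
  let dp := (List.replicate (N + 1).toNat (0 : Int)).set 0 1   -- dp = [0]*(N+1); dp[0] = 1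
  (PySem.List.pyRange 1 (N + 1) 1).foldl (fun dp n =>
    let res := (PySem.List.pyRange 0 n 1).foldl (fun res i =>
      res + PySem.List.pyGetD dp i 0 * PySem.List.pyGetD dp (n - 1 - i) 0) 0
    dp.set n.toNat res) dp

-- ===== PORT B =====
def catalan_table_alt (N : Int) : List Int :=
  ((PySem.List.pyRange 1 (N + 1) 1).foldl (fun (st : List Int × Int) n =>
    let c := PySem.Int.floordiv (st.2 * 2 * (2 * n - 1)) (n + 1)
    (st.1 ++ [c], c)) ([1], 1)).1

-- ===== PRECONDITION & SPEC =====
-- Pre_ excludes N < 0, where A raises IndexError (dp is empty when it assigns dp[0]).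
def Pre_catalan_table (N : Int) : Prop := 0 ≤ N
instance (N : Int) : Decidable (Pre_catalan_table N) := by unfold Pre_catalan_table; infer_instance
def pvWitness_catalan_table : Int := 5

def Spec_catalan_table (N : Int) (out : List Int) : Prop := out = catalan_table_alt N
instance (N : Int) (out : List Int) : Decidable (Spec_catalan_table N out) := by unfold Spec_catalan_table; infer_instance

-- ===== CLAIM (what is proved, stated in full; the proofs are below) =====
def Claim_equal_catalan_table : Prop := ∀ (N : Int), Dom_catalan_table N → Pre_catalan_table N → Spec_catalan_table N (catalan_table N)

-- ===== LEMMAS AND PROOFS =====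

-- The first m+1 Catalan numbers, as Int.
def catL (m : Nat) : List Int := (List.range (m + 1)).map (fun k => (catalan k : Int))

lemma catL_succ (m : Nat) : catL (m + 1) = catL m ++ [(catalan (m + 1) : Int)] := by
  simp [catL, List.range_succ]

lemma length_catL (m : Nat) : (catL m).length = m + 1 := by simp [catL]

-- The linear recurrence, from Mathlib's central-binomial facts.
lemma catalan_linear_rec (m : Nat) :
    (m + 2) * catalan (m + 1) = 2 * (2 * m + 1) * catalan m := by
  have h1 := succ_mul_catalan_eq_centralBinom (m + 1)
  have h2 := Nat.succ_mul_centralBinom_succ m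
  have h3 := succ_mul_catalan_eq_centralBinom m
  have key : (m + 1) * ((m + 2) * catalan (m + 1)) = (m + 1) * (2 * (2 * m + 1) * catalan m) := by
    rw [h1, h2, ← h3]; ring
  exact Nat.eq_of_mul_eq_mul_left (Nat.succ_pos m) key

-- B's single step computes the next Catalan number.
lemma step_B (m : Nat) :
    PySem.Int.floordiv ((catalan m : Int) * 2 * (2 * ((m : Int) + 1) - 1) + 0)
      ((m : Int) + 1 + 1) = (catalan (m + 1) : Int) := by
  have hrec : ((catalan m : Int) * 2 * (2 * ((m : Int) + 1) - 1) + 0) =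
      ((m : Int) + 2) * (catalan (m + 1) : Int) := by
    have := catalan_linear_rec m
    have : ((m : Int) + 2) * (catalan (m + 1) : Int) = 2 * (2 * (m : Int) + 1) * (catalan m : Int) := by
      exact_mod_cast congrArg (fun k : Nat => (k : Int)) this
    rw [this]; ring
  rw [hrec, PySem.Int.floordiv_eq_ediv_of_pos (by positivity)]
  have h2 : ((m : Int) + 1 + 1) = ((m : Int) + 2) := by ring
  rw [h2, Int.mul_ediv_cancel_left _ (by positivity)]

-- B's fold builds the Catalan table.
lemma foldB (M : Nat) :
    (PySem.List.pyRange 1 ((M : Int) + 1) 1).foldl (fun (st : List Int × Int) n =>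
      ((st.1 ++ [PySem.Int.floordiv (st.2 * 2 * (2 * n - 1)) (n + 1)]),
        PySem.Int.floordiv (st.2 * 2 * (2 * n - 1)) (n + 1))) ([1], 1)
      = (catL M, (catalan M : Int)) := by
  induction M with
  | zero =>
    rw [PySem.List.pyRange_one_eq_nil (a := 1) (b := ((0 : Nat) : Int) + 1) (by norm_num)]
    simp [catL]
  | succ m ih =>
    have hsplit : PySem.List.pyRange 1 ((m : Int) + 1 + 1) 1
        = PySem.List.pyRange 1 ((m : Int) + 1) 1 ++ [(m : Int) + 1] := by
      exact_mod_cast PySem.List.pyRange_one_succ_right (a := 1) (b := (m : Int) + 1) (by omega)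
    have hcast : ((m + 1 : Nat) : Int) + 1 = (m : Int) + 1 + 1 := by push_cast; ring
    rw [hcast, hsplit, List.foldl_append, ih]
    have := step_B m
    simp only [List.foldl_cons, List.foldl_nil]
    have hc : PySem.Int.floordiv ((catalan m : Int) * 2 * (2 * ((m : Int) + 1) - 1))
        ((m : Int) + 1 + 1) = (catalan (m + 1) : Int) := by
      have h0 : (catalan m : Int) * 2 * (2 * ((m : Int) + 1) - 1)
          = (catalan m : Int) * 2 * (2 * ((m : Int) + 1) - 1) + 0 := by ring
      rw [h0]; exact step_B m
    rw [hc, catL_succ]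

lemma alt_eq_catL (M : Nat) : catalan_table_alt (M : Int) = catL M := by
  unfold catalan_table_alt
  rw [foldB M]

-- A's inner convolution loop computes the next Catalan number from the table so far.
lemma inner_A (m M : Nat) (_hm : m ≤ M) :
    (PySem.List.pyRange 0 ((m : Int) + 1) 1).foldl (fun res i =>
      res + PySem.List.pyGetD (catL m ++ List.replicate (M - m) 0) i 0 *
        PySem.List.pyGetD (catL m ++ List.replicate (M - m) 0) ((m : Int) + 1 - 1 - i) 0) 0
      = (catalan (m + 1) : Int) := by
  have hget : ∀ k : Nat, k ≤ m →
      PySem.List.pyGetD (catL m ++ List.replicate (M - m) 0) (k : Int) 0 = (catalan k : Int) := by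
    intro k hk
    rw [PySem.List.pyGetD_natCast,
      List.getD_append (catL m) (List.replicate (M - m) 0) 0 k (by rw [length_catL]; omega)]
    simp [catL, List.getD_eq_getElem?_getD, List.getElem?_map,
      List.getElem?_range (by omega : k < m + 1)]
  have hc1 : (m : Int) + 1 = ((m + 1 : Nat) : Int) := by push_cast; ring
  rw [hc1, PySem.List.pyRange_zero_natCast, List.foldl_map, PySem.List.foldl_add]
  have hmap : (List.range (m + 1)).map (fun k =>
        PySem.List.pyGetD (catL m ++ List.replicate (M - m) 0) ((k : Nat) : Int) 0 *
        PySem.List.pyGetD (catL m ++ List.replicate (M - m) 0) (((m + 1 : Nat) : Int) - 1 - (k : Nat)) 0)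
      = (List.range (m + 1)).map (fun k => (catalan k : Int) * (catalan (m - k) : Int)) := by
    apply List.map_congr_left
    intro k hk
    rw [List.mem_range] at hk
    have hidx : ((m + 1 : Nat) : Int) - 1 - (k : Nat) = ((m - k : Nat) : Int) := by
      have : k ≤ m := by omega
      push_cast [this]; ring
    rw [hget k (by omega), hidx, hget (m - k) (by omega)]
  rw [hmap]
  have hsum : ((List.range (m + 1)).map (fun k => (catalan k : Int) * (catalan (m - k) : Int))).sum
      = ∑ i ∈ Finset.range (m + 1), ((catalan i : Int) * (catalan (m - i) : Int)) := rfl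
  have hnat : catalan (m + 1) = ∑ i ∈ Finset.range (m + 1), catalan i * catalan (m - i) := by
    rw [catalan_succ, Fin.sum_univ_eq_sum_range (fun i => catalan i * catalan (m - i)) (m + 1)]
  rw [hsum, hnat]
  push_cast
  ring

-- A's outer fold maintains: table of Catalan numbers up to m, zeros after.
lemma foldA (M m : Nat) (hm : m ≤ M) :
    (PySem.List.pyRange 1 ((m : Int) + 1) 1).foldl (fun dp n =>
      dp.set n.toNat ((PySem.List.pyRange 0 n 1).foldl (fun res i =>
        res + PySem.List.pyGetD dp i 0 * PySem.List.pyGetD dp (n - 1 - i) 0) 0))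
      ((List.replicate (M + 1) (0 : Int)).set 0 1)
      = catL m ++ List.replicate (M - m) 0 := by
  induction m with
  | zero =>
    rw [PySem.List.pyRange_one_eq_nil (a := 1) (b := ((0 : Nat) : Int) + 1) (by norm_num)]
    simp [catL, List.replicate_succ]
  | succ k ih =>
    have hk : k ≤ M := by omega
    have hcast : ((k + 1 : Nat) : Int) + 1 = (k : Int) + 1 + 1 := by push_cast; ring
    have hsplit : PySem.List.pyRange 1 ((k : Int) + 1 + 1) 1
        = PySem.List.pyRange 1 ((k : Int) + 1) 1 ++ [(k : Int) + 1] := by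
      exact_mod_cast PySem.List.pyRange_one_succ_right (a := 1) (b := (k : Int) + 1) (by omega)
    rw [hcast, hsplit, List.foldl_append, ih hk]
    simp only [List.foldl_cons, List.foldl_nil]
    rw [inner_A k M hk]
    have htoNat : ((k : Int) + 1).toNat = k + 1 := by omega
    rw [htoNat, List.set_append]
    have hlen : (catL k).length = k + 1 := length_catL k
    rw [hlen]
    simp only [lt_irrefl, if_false, Nat.sub_self]
    have hrep : (List.replicate (M - k) (0 : Int)).set 0 (catalan (k + 1) : Int)
        = (catalan (k + 1) : Int) :: List.replicate (M - (k + 1)) 0 := by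
      have : M - k = (M - (k + 1)) + 1 := by omega
      rw [this, List.replicate_succ]; simp
    rw [hrep, catL_succ]
    simp

-- ===== VERDICT (by name: the statement is the Claim_ definition above) =====
theorem catalan_table_spec : Claim_equal_catalan_table := by
  intro N _ hpre
  unfold Spec_catalan_table
  obtain ⟨M, rfl⟩ : ∃ M : Nat, N = (M : Int) := ⟨N.toNat, (Int.toNat_of_nonneg hpre).symm⟩
  rw [alt_eq_catL]
  unfold catalan_table
  have htoNat : ((M : Int) + 1).toNat = M + 1 := by omega
  rw [htoNat]
  have := foldA M M (le_refl M)
  simpa using this
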